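-- pv_equiv track=rewrite | github.com/Avii-KS/Python | 5th belt/Palindrom.py | is_rotated_palindrome
-- ===== SOURCE A (Python) =====
-- def is_rotated_palindrome(s):
--     def is_palindrome(string):
--         return string == string[::-1]
--
--     n = len(s)
--     for i in range(n):
--         rotated = s[i:] + s[:i]
--         if is_palindrome(rotated):
--             return "Yes, the rotated string is a palindrome."
--     return "No, no rotation creates a palindrome."
-- ===== SOURCE B (Python) =====
-- def is_rotated_palindrome(s):
--     n = len(s)
--     t = ''.join('#' + ch for ch in s + s) + '#'
--     m = len(t)
--     p = [0] * m
--     c = r = 0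
--     for i in range(m):
--         k = min(r - i, p[2 * c - i]) if i < r else 0
--         while k + 1 <= i and i + k + 1 < m and t[i - k - 1] == t[i + k + 1]:
--             k += 1
--         p[i] = k
--         if i + k > r:
--             c, r = i, i + k
--     for i in range(n):
--         if p[2 * i + n] >= n:
--             return "Yes, the rotated string is a palindrome."
--     return "No, no rotation creates a palindrome."
-- ===== Notes on version B (the rewrite author's own statement) =====
-- stated objective: faster
-- what changed: Instead of materialising every rotation and its reverse and comparing them (O(n) work per rotation), B runs Manacher's algorithm once over the '#'-augmented doubled string s+s to get the maximal palindromic radius at every centre in linear total time, then answers from the radius table: rotation i is a palindrome iff the radius at centre 2*i+n is at least n.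
import Mathlib
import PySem

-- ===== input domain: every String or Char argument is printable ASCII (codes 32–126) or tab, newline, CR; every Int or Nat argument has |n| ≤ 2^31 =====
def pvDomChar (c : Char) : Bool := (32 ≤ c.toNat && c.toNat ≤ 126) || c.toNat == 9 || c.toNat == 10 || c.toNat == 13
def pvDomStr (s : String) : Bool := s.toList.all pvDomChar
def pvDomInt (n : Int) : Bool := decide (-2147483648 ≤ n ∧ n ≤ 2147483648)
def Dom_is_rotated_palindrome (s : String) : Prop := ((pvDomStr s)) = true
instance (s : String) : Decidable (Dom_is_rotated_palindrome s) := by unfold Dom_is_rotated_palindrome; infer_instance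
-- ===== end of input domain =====

-- B replaces A's rotation-by-rotation palindrome test by one run of Manacher's
-- algorithm over the '#'-augmented doubled string, answering each rotation from
-- the radius table (objective: faster, measured).

-- ===== PORT A =====
-- for i in range(n): rotated = s[i:] + s[:i]; if rotated == rotated[::-1] …
def pvAloop (l : List Char) : List Int → String
  | [] => "No, no rotation creates a palindrome."
  | i :: rest =>
    let rotated := PySem.List.slice l (some i) none ++ PySem.List.slice l none (some i)
    -- string[::-1]: slice? with step -1 is always `some`, the default is never used
    if rotated = (PySem.List.slice? rotated none none (-1)).getD [] then
      "Yes, the rotated string is a palindrome."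
    else pvAloop l rest

def is_rotated_palindrome (s : String) : String :=
  pvAloop s.toList (PySem.List.pyRange 0 s.toList.length 1)

-- ===== PORT B =====
-- All integers in Source B are nonnegative and every subtraction is guarded to stay
-- nonnegative before it is used, so the port carries them as Nat; each list index
-- is guarded in range before the access, so getD's default is never used.

-- t = ''.join('#' + ch for ch in s + s) + '#'
def pvT (u : List Char) : List Char := (u.flatMap (fun ch => ['#', ch])) ++ ['#']

-- while k + 1 <= i and i + k + 1 < m and t[i-k-1] == t[i+k+1]: k += 1
def pvExtend (t : List Char) (i k : Nat) : Nat :=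
  if h : k + 1 ≤ i ∧ i + k + 1 < t.length ∧ t.getD (i - k - 1) ' ' = t.getD (i + k + 1) ' ' then
    pvExtend t i (k + 1)
  else k
termination_by t.length - k
decreasing_by obtain ⟨h1, h2, -⟩ := h; omega

-- one iteration of the main Manacher loop, state (p, c, r)
def pvManStep (t : List Char) (st : List Nat × Nat × Nat) (i : Nat) : List Nat × Nat × Nat :=
  let k0 := if i < st.2.2 then min (st.2.2 - i) (st.1.getD (2 * st.2.1 - i) 0) else 0
  let k := pvExtend t i k0
  let p' := st.1.set i k
  if i + k > st.2.2 then (p', i, i + k) else (p', st.2.1, st.2.2)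

def pvManacher (t : List Char) : List Nat :=
  ((List.range t.length).foldl (pvManStep t) (List.replicate t.length 0, 0, 0)).1

-- for i in range(n): if p[2*i + n] >= n: return Yes … return No
def pvBscan (p : List Nat) (n : Nat) : List Nat → String
  | [] => "No, no rotation creates a palindrome."
  | i :: rest =>
    if n ≤ p.getD (2 * i + n) 0 then "Yes, the rotated string is a palindrome."
    else pvBscan p n rest

def is_rotated_palindrome_alt (s : String) : String :=
  let l := s.toList
  let t := pvT (l ++ l)
  pvBscan (pvManacher t) l.length (List.range l.length)

-- ===== PRECONDITION & SPEC =====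
def Spec_is_rotated_palindrome (s : String) (out : String) : Prop := out = is_rotated_palindrome_alt s
instance (s : String) (out : String) : Decidable (Spec_is_rotated_palindrome s out) := by unfold Spec_is_rotated_palindrome; infer_instance

-- ===== CLAIM (what is proved, stated in full; the proofs are below) =====
def Claim_equal_is_rotated_palindrome : Prop := ∀ (s : String), Dom_is_rotated_palindrome s → Spec_is_rotated_palindrome s (is_rotated_palindrome s)

-- ===== LEMMAS AND PROOFS =====

-- —— the augmented string t: length and characters ——

lemma pvT_length (u : List Char) : (pvT u).length = 2 * u.length + 1 := by
  induction u with
  | nil => rfl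
  | cons c u ih =>
    simp only [pvT, List.flatMap_cons, List.append_assoc, List.length_append] at *
    simp at *; omega

lemma pvT_cons (c : Char) (u : List Char) : pvT (c :: u) = '#' :: c :: pvT u := by
  simp [pvT]

lemma pvT_get_even (u : List Char) (k : Nat) (hk : k ≤ u.length) :
    (pvT u).getD (2 * k) ' ' = '#' := by
  induction u generalizing k with
  | nil =>
    have h0 : k = 0 := by simpa using hk
    subst h0; rfl
  | cons c u ih =>
    rw [pvT_cons]
    cases k with
    | zero => rfl
    | succ k =>
      have : 2 * (k + 1) = (2 * k) + 1 + 1 := by omega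
      rw [this]
      simpa using ih k (by simpa using hk)

lemma pvT_get_odd (u : List Char) (k : Nat) (hk : k < u.length) :
    (pvT u).getD (2 * k + 1) ' ' = u.getD k ' ' := by
  induction u generalizing k with
  | nil => simp at hk
  | cons c u ih =>
    rw [pvT_cons]
    cases k with
    | zero => rfl
    | succ k =>
      have : 2 * (k + 1) + 1 = (2 * k + 1) + 1 + 1 := by omega
      rw [this]
      simpa using ih k (by simpa using hk)

-- —— palindromic radii ——

-- "t has a palindrome of radius k centred at i"
def pvPalAt (t : List Char) (i k : Nat) : Prop :=
  k ≤ i ∧ i + k < t.length ∧ ∀ j, j ≤ k → t.getD (i - j) ' ' = t.getD (i + j) ' '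

def pvMaxPal (t : List Char) (i k : Nat) : Prop := pvPalAt t i k ∧ ¬ pvPalAt t i (k + 1)

lemma pvPalAt_mono {t : List Char} {i k k' : Nat} (h : pvPalAt t i k) (hk : k' ≤ k) :
    pvPalAt t i k' :=
  ⟨le_trans hk h.1, by have := h.2.1; omega, fun j hj => h.2.2 j (le_trans hj hk)⟩

lemma pvPalAt_zero {t : List Char} {i : Nat} (h : i < t.length) : pvPalAt t i 0 :=
  ⟨Nat.zero_le _, by omega, fun j hj => by interval_cases j; rfl⟩

lemma pvMaxPal_ge_iff {t : List Char} {i k n : Nat} (h : pvMaxPal t i k) :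
    n ≤ k ↔ pvPalAt t i n := by
  constructor
  · intro hn; exact pvPalAt_mono h.1 hn
  · intro hn
    by_contra hc
    exact h.2 (pvPalAt_mono hn (by omega))

-- —— the while loop computes the maximal radius from any sound start ——

lemma pvExtend_spec (t : List Char) (i k : Nat) (h : pvPalAt t i k) :
    pvMaxPal t i (pvExtend t i k) := by
  rw [pvExtend]
  split_ifs with hg
  · obtain ⟨h1, h2, h3⟩ := hg
    refine pvExtend_spec t i (k + 1) ⟨by omega, by omega, fun j hj => ?_⟩
    rcases Nat.lt_or_ge j (k + 1) with hj' | hj'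
    · exact h.2.2 j (by omega)
    · have : j = k + 1 := by omega
      subst this
      have e1 : i - (k + 1) = i - k - 1 := by omega
      have e2 : i + (k + 1) = i + k + 1 := by omega
      rw [e1, e2]; exact h3
  · refine ⟨h, fun hc => ?_⟩
    obtain ⟨c1, c2, c3⟩ := hc
    refine hg ⟨by omega, by omega, ?_⟩
    have e1 : i - k - 1 = i - (k + 1) := by omega
    have e2 : i + k + 1 = i + (k + 1) := by omega
    rw [e1, e2]; exact c3 (k + 1) le_rfl
termination_by t.length - k
decreasing_by omega

-- —— reflection inside a palindrome, and soundness of the mirror initialisation ——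

lemma pvReflect {t : List Char} {c R : Nat} (h : pvPalAt t c R) {x : Nat}
    (hx1 : c - R ≤ x) (hx2 : x ≤ c + R) :
    t.getD x ' ' = t.getD (2 * c - x) ' ' := by
  rcases Nat.le_total x c with hxc | hxc
  · have hj : c - x ≤ R := by omega
    have := h.2.2 (c - x) hj
    have e1 : c - (c - x) = x := by omega
    have e2 : c + (c - x) = 2 * c - x := by omega
    rwa [e1, e2] at this
  · have hR : R ≤ c := h.1
    have hj : x - c ≤ R := by omega
    have := h.2.2 (x - c) hj
    have e1 : c - (x - c) = 2 * c - x := by omega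
    have e2 : c + (x - c) = x := by omega
    rw [e1, e2] at this
    exact this.symm

lemma pvMirror {t : List Char} {c R i q : Nat} (hc : pvPalAt t c R)
    (hci : c < i) (hir : i ≤ c + R) (hq : pvPalAt t (2 * c - i) q) :
    pvPalAt t i (min (c + R - i) q) := by
  have hRc : R ≤ c := hc.1
  have hqj : q ≤ 2 * c - i := hq.1
  refine ⟨by omega, by have := hc.2.1; omega, fun k hk => ?_⟩
  have hk1 : k ≤ c + R - i := le_trans hk (Nat.min_le_left _ _)
  have hk2 : k ≤ q := le_trans hk (Nat.min_le_right _ _)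
  have r1 : t.getD (i + k) ' ' = t.getD (2 * c - (i + k)) ' ' :=
    pvReflect hc (by omega) (by omega)
  have r2 : t.getD (i - k) ' ' = t.getD (2 * c - (i - k)) ' ' :=
    pvReflect hc (by omega) (by omega)
  have e1 : 2 * c - (i + k) = (2 * c - i) - k := by omega
  have e2 : 2 * c - (i - k) = (2 * c - i) + k := by omega
  have hm := hq.2.2 k hk2
  rw [r1, r2, e1, e2]
  rw [hm]

-- —— the main loop invariant ——

def pvInv (t : List Char) (i : Nat) (st : List Nat × Nat × Nat) : Prop :=
  st.1.length = t.length ∧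
  (∀ j, j < i → pvMaxPal t j (st.1.getD j 0)) ∧
  ((st.2.1 < i ∧ st.2.1 ≤ st.2.2 ∧ pvPalAt t st.2.1 (st.2.2 - st.2.1)) ∨
    (st.2.1 = 0 ∧ st.2.2 = 0))

lemma pvGetD_set_self {l : List Nat} {i : Nat} {v : Nat} (h : i < l.length) :
    (l.set i v).getD i 0 = v := by
  rw [List.getD_eq_getElem _ _ (by simpa using h)]
  simp

lemma pvGetD_set_ne {l : List Nat} {i j : Nat} {v : Nat} (h : j ≠ i) :
    (l.set i v).getD j 0 = l.getD j 0 := by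
  rcases Nat.lt_or_ge j l.length with hj | hj
  · rw [List.getD_eq_getElem _ _ (by simpa using hj), List.getD_eq_getElem _ _ hj]
    simp [h.symm]
  · rw [List.getD_eq_default _ _ (by simpa using hj), List.getD_eq_default _ _ hj]

lemma pvInvStep (t : List Char) (i : Nat) (st : List Nat × Nat × Nat)
    (hi : i < t.length) (h : pvInv t i st) : pvInv t (i + 1) (pvManStep t st i) := by
  obtain ⟨p, c, r⟩ := st
  unfold pvInv at h ⊢
  dsimp only at h ⊢
  obtain ⟨hlen, hprev, hcr⟩ := h
  have hk0 : pvPalAt t i (if i < r then min (r - i) (p.getD (2 * c - i) 0) else 0) := by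
    split_ifs with hir
    · rcases hcr with ⟨hci, hcle, hpal⟩ | ⟨hc0, hr0⟩
      · have hmir : 2 * c - i < i := by omega
        have hq := (hprev _ hmir).1
        have := pvMirror hpal hci (by omega) hq
        have e : c + (r - c) - i = r - i := by omega
        rwa [e] at this
      · omega
    · exact pvPalAt_zero hi
  have hmax := pvExtend_spec t i _ hk0
  simp only [pvManStep]
  set k := pvExtend t i (if i < r then min (r - i) (p.getD (2 * c - i) 0) else 0) with hkdef
  have hilen : i < p.length := by omega
  have hnewp : ∀ j, j < i + 1 → pvMaxPal t j ((p.set i k).getD j 0) := by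
    intro j hj
    rcases Nat.lt_or_ge j i with hji | hji
    · rw [pvGetD_set_ne (by omega)]; exact hprev j hji
    · have hji' : j = i := by omega
      subst hji'
      rw [pvGetD_set_self hilen]; exact hmax
  by_cases hgrow : i + k > r
  · rw [if_pos hgrow]
    refine ⟨by simpa using hlen, hnewp, Or.inl ⟨?_, ?_, ?_⟩⟩
    · show i < i + 1
      omega
    · show i ≤ i + k
      omega
    · show pvPalAt t i (i + k - i)
      have e : i + k - i = k := by omega
      rw [e]; exact hmax.1
  · rw [if_neg hgrow]
    refine ⟨by simpa using hlen, hnewp, ?_⟩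
    dsimp only
    rcases hcr with ⟨hci, hcle, hpal⟩ | ⟨hc0, hr0⟩
    · exact Or.inl ⟨by omega, hcle, hpal⟩
    · exact Or.inr ⟨hc0, hr0⟩

lemma pvManacher_maxPal (t : List Char) :
    ∀ j, j < t.length → pvMaxPal t j ((pvManacher t).getD j 0) := by
  have main : ∀ n, n ≤ t.length →
      pvInv t n ((List.range n).foldl (pvManStep t) (List.replicate t.length 0, 0, 0)) := by
    intro n
    induction n with
    | zero =>
      intro _
      exact ⟨by simp, fun j hj => absurd hj (by omega), Or.inr ⟨rfl, rfl⟩⟩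
    | succ n ih =>
      intro hn
      rw [List.range_succ, List.foldl_append, List.foldl_cons, List.foldl_nil]
      exact pvInvStep t n _ (by omega) (ih (by omega))
  exact (main t.length le_rfl).2.1

-- —— the window characterisation: radius n at centre 2i+n ⇔ mirror pairs of u agree ——

-- pointwise window condition on u = l ++ l for rotation offset i
def pvWCond (u : List Char) (n i : Nat) : Prop :=
  ∀ j, j < n → u.getD (i + j) ' ' = u.getD (i + n - 1 - j) ' '

lemma pvWCond_core (u : List Char) (n i : Nat) (hu : u.length = 2 * n) (hi : i < n)
    (h : pvPalAt (pvT u) (2 * i + n) n) {j : Nat} (hj : 2 * j + 1 ≤ n) :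
    u.getD (i + j) ' ' = u.getD (i + n - 1 - j) ' ' := by
  have hpair := h.2.2 (n - 2 * j - 1) (by omega)
  have e1 : 2 * i + n - (n - 2 * j - 1) = 2 * (i + j) + 1 := by omega
  have e2 : 2 * i + n + (n - 2 * j - 1) = 2 * (i + n - 1 - j) + 1 := by omega
  rw [e1, e2, pvT_get_odd u _ (by omega), pvT_get_odd u _ (by omega)] at hpair
  exact hpair

lemma pvWindow_iff (u : List Char) (n i : Nat) (hu : u.length = 2 * n) (hi : i < n) :
    pvPalAt (pvT u) (2 * i + n) n ↔ pvWCond u n i := by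
  have htl : (pvT u).length = 4 * n + 1 := by rw [pvT_length, hu]; omega
  constructor
  · intro h j hj
    rcases Nat.le_total (2 * j + 1) n with hj2 | hj2
    · exact pvWCond_core u n i hu hi h hj2
    · have hj' : 2 * (n - 1 - j) + 1 ≤ n := by omega
      have := pvWCond_core u n i hu hi h hj'
      have e : i + n - 1 - (n - 1 - j) = i + j := by omega
      have e2 : i + (n - 1 - j) = i + n - 1 - j := by omega
      rw [e, e2] at this
      exact this.symm
  · intro h
    refine ⟨by omega, by omega, fun k hk => ?_⟩
    rcases Nat.even_or_odd (n + k) with hpar | hpar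
    · -- both touched positions carry '#'
      obtain ⟨a, ha⟩ := hpar
      have e1 : 2 * i + n - k = 2 * (2 * i + n - k) / 2 := by omega
      have e2 : (2 * i + n - k) % 2 = 0 := by omega
      have e3 : (2 * i + n + k) % 2 = 0 := by omega
      have g1 : (pvT u).getD (2 * i + n - k) ' ' = '#' := by
        have e : 2 * i + n - k = 2 * ((2 * i + n - k) / 2) := by omega
        rw [e, pvT_get_even u _ (by omega)]
      have g2 : (pvT u).getD (2 * i + n + k) ' ' = '#' := by
        have e : 2 * i + n + k = 2 * ((2 * i + n + k) / 2) := by omega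
        rw [e, pvT_get_even u _ (by omega)]
      rw [g1, g2]
    · -- both touched positions carry characters of u, a mirror pair of the window
      have hkn : k < n := by
        rcases Nat.lt_or_ge k n with h' | h'
        · exact h'
        · exfalso
          have : k = n := by omega
          subst this
          obtain ⟨a, ha⟩ := hpar
          omega
      obtain ⟨a, ha⟩ := hpar
      have hje : ∃ j, j < n ∧ 2 * i + n - k = 2 * (i + j) + 1 ∧
          2 * i + n + k = 2 * (i + n - 1 - j) + 1 := by
        refine ⟨(n - k - 1) / 2, by omega, by omega, by omega⟩
      obtain ⟨j, hjn, f1, f2⟩ := hje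
      rw [f1, f2, pvT_get_odd u _ (by omega), pvT_get_odd u _ (by omega)]
      exact h j hjn

-- —— the A-side condition for rotation i is the same window condition ——

def pvRot (l : List Char) (j : Nat) : List Char := l.drop j ++ l.take j

lemma pvRot_length (l : List Char) (j : Nat) : (pvRot l j).length = l.length := by
  simp [pvRot]; omega

lemma pvRot_getD (l : List Char) (i j : Nat) (hi : i ≤ l.length) (hj : j < l.length) :
    (pvRot l i).getD j ' ' = (l ++ l).getD (i + j) ' ' := by
  unfold pvRot
  by_cases h : j < l.length - i
  · rw [List.getD_append _ _ _ _ (by simp; omega),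
        List.getD_append _ _ _ _ (by omega)]
    rw [List.getD_eq_getElem _ _ (by simp; omega), List.getElem_drop,
        List.getD_eq_getElem _ _ (by omega)]
  · rw [List.getD_append_right _ _ _ _ (by simp; omega),
        List.getD_append_right _ _ _ _ (by omega)]
    rw [List.getD_eq_getElem _ _ (by simp; omega), List.getElem_take,
        List.getD_eq_getElem _ _ (by omega)]
    congr 1
    simp only [List.length_drop]
    omega

lemma pvRev_getD (r : List Char) (k : Nat) (hk : k < r.length) :
    r.reverse.getD k ' ' = r.getD (r.length - 1 - k) ' ' := by
  rw [List.getD_eq_getElem _ _ (by simpa using hk), List.getElem_reverse,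
      List.getD_eq_getElem _ _ (by omega)]

lemma pvRev_iff_full (r : List Char) :
    r = r.reverse ↔ ∀ j, j < r.length → r.getD j ' ' = r.getD (r.length - 1 - j) ' ' := by
  constructor
  · intro h j hj
    rw [← pvRev_getD r j hj, ← h]
  · intro h
    apply List.ext_getElem (by simp)
    intro k hk hk'
    rw [List.getElem_reverse, ← List.getD_eq_getElem r ' ' hk,
        ← List.getD_eq_getElem r ' ' (show r.length - 1 - k < r.length by omega)]
    exact h k hk

lemma pvACond_iff (l : List Char) (i : Nat) (hi : i < l.length) :
    (pvRot l i = (pvRot l i).reverse) ↔ pvWCond (l ++ l) l.length i := by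
  rw [pvRev_iff_full, pvRot_length]
  unfold pvWCond
  constructor
  · intro h j hj
    have := h j hj
    rw [pvRot_getD l i j (by omega) hj, pvRot_getD l i _ (by omega) (by omega)] at this
    have e : i + (l.length - 1 - j) = i + l.length - 1 - j := by omega
    rwa [e] at this
  · intro h j hj
    rw [pvRot_getD l i j (by omega) hj, pvRot_getD l i _ (by omega) (by omega)]
    have e : i + (l.length - 1 - j) = i + l.length - 1 - j := by omega
    rw [e]
    exact h j hj

-- —— the B-side condition for rotation i is the same window condition ——

lemma pvBCond_iff (l : List Char) (i : Nat) (hi : i < l.length) :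
    (l.length ≤ (pvManacher (pvT (l ++ l))).getD (2 * i + l.length) 0) ↔
      pvWCond (l ++ l) l.length i := by
  have hu : (l ++ l).length = 2 * l.length := by simp; omega
  have htl : (pvT (l ++ l)).length = 4 * l.length + 1 := by rw [pvT_length, hu]; omega
  have hmax := pvManacher_maxPal (pvT (l ++ l)) (2 * i + l.length) (by omega)
  rw [pvMaxPal_ge_iff hmax]
  exact pvWindow_iff (l ++ l) l.length i hu hi

-- —— both loops scan i = 0 … n-1 with equivalent conditions ——

lemma pvLoops_eq (l : List Char) (idxs : List Nat)
    (hidx : ∀ i ∈ idxs, i < l.length) :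
    pvAloop l (idxs.map (Nat.cast : Nat → Int)) =
      pvBscan (pvManacher (pvT (l ++ l))) l.length idxs := by
  induction idxs with
  | nil => rfl
  | cons i rest ih =>
    have hi : i < l.length := hidx i List.mem_cons_self
    simp only [List.map_cons, pvAloop, pvBscan, PySem.List.slice?_none_none_neg_one,
      Option.getD_some]
    have hslice : PySem.List.slice l (some (i : Int)) none ++
        PySem.List.slice l none (some (i : Int)) = pvRot l i := by
      rw [PySem.List.slice_from_natCast, PySem.List.slice_to_natCast]
      rfl
    rw [hslice]
    have hcond : (pvRot l i = (pvRot l i).reverse) ↔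
        (l.length ≤ (pvManacher (pvT (l ++ l))).getD (2 * i + l.length) 0) := by
      rw [pvACond_iff l i hi, pvBCond_iff l i hi]
    by_cases hpal : pvRot l i = (pvRot l i).reverse
    · rw [if_pos hpal, if_pos (hcond.mp hpal)]
    · rw [if_neg hpal, if_neg (fun hc => hpal (hcond.mpr hc))]
      exact ih (fun x hx => hidx x (List.mem_cons_of_mem _ hx))

lemma pvRange_cast (n : Nat) :
    PySem.List.pyRange 0 (n : Int) 1 = (List.range n).map (Nat.cast : Nat → Int) := by
  rw [PySem.List.pyRange_one]
  simp

-- ===== VERDICT (by name: the statement is the Claim_ definition above) =====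
theorem is_rotated_palindrome_spec : Claim_equal_is_rotated_palindrome := by
  intro s _
  unfold Spec_is_rotated_palindrome is_rotated_palindrome is_rotated_palindrome_alt
  rw [pvRange_cast]
  exact pvLoops_eq s.toList (List.range s.toList.length)
    (fun i hi => List.mem_range.mp hi)
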